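-- pv_equiv track=rewrite | github.com/zhengyunkun/virtual-kernel | vkernel_builder/util.py | and_mode
-- ===== SOURCE A (Python) =====
-- def and_mode(capa1, capa2):  # conbine the permission of the same file.
--     mode = ""
--     for i in range(len(capa1)):
--         if capa1[i:i+1] == capa2[i:i+1]:
--             mode = mode + capa1[i:i+1]
--         else:
--             mode = mode + "1"
--     return mode
-- ===== SOURCE B (Python) =====
-- def and_mode(capa1, capa2):
--     # Run-based: find each maximal run where the two strings agree, copy that
--     # whole slice of capa1 at once, emit "1" for the single mismatching
--     # position after it (positions past capa2's end always mismatch), repeat.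
--     parts = []
--     i, n, m = 0, len(capa1), len(capa2)
--     while i < n:
--         j = i
--         while j < n and j < m and capa1[j] == capa2[j]:
--             j += 1
--         parts.append(capa1[i:j])
--         if j < n:
--             parts.append("1")
--             j += 1
--         i = j
--     return "".join(parts)
-- ===== Notes on version B (the rewrite author's own statement) =====
-- stated objective: alternative
-- what changed: Replaces A's per-index loop (one-character slices, quadratic concatenation) with a run-based scan that copies each maximal matching run of capa1 as a single slice, emits one '1' per mismatch position, and joins the parts once at the end.
import Mathlib
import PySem

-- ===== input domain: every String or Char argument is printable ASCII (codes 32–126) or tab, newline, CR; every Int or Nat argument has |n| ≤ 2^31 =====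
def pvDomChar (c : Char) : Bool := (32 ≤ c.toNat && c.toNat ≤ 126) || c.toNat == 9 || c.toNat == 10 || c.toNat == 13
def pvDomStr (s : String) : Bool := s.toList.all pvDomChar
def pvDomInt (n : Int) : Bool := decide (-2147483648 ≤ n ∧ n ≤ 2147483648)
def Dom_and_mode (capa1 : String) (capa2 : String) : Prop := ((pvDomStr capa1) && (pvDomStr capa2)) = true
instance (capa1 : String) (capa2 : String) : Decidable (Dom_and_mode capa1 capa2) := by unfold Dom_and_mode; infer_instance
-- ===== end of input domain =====

-- B replaces A's per-index loop by a run-based scan: each maximal matching run of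
-- capa1 is copied as one slice, one '1' per mismatch position, joined at the end
-- (different algorithm, same return value; no speed claim).

-- ===== PORT A =====
-- literal port of A: for i in range(len(capa1)): compare slices capa1[i:i+1], capa2[i:i+1]
def and_mode (capa1 : String) (capa2 : String) : String :=
  String.ofList <|
    (PySem.List.pyRange 0 (PySem.Str.len capa1) 1).foldl
      (fun mode i =>
        if PySem.List.slice capa1.toList (some i) (some (i + 1))
             = PySem.List.slice capa2.toList (some i) (some (i + 1)) then
          mode ++ PySem.List.slice capa1.toList (some i) (some (i + 1))
        else
          mode ++ ['1'])
      []

-- ===== PORT B =====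
-- inner while loop of B: advance j over the maximal run where capa1[j] == capa2[j]
-- (indices are in range by the guard, so List.getD is exact for Python's capa1[j])
def bInner (l1 l2 : List Char) (j : Nat) : Nat :=
  if h : j < l1.length ∧ j < l2.length ∧ l1.getD j ' ' = l2.getD j ' ' then
    bInner l1 l2 (j + 1)
  else j
termination_by l1.length - j
decreasing_by omega

-- the inner loop never moves j backwards (needed for bOuter's termination)
lemma bInner_ge (l1 l2 : List Char) (j : Nat) : j ≤ bInner l1 l2 j := by
  induction j using bInner.induct l1 l2 with
  | case1 j h ih => rw [bInner, dif_pos h]; omega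
  | case2 j h => rw [bInner, dif_neg h]

-- outer while loop of B: parts accumulated and joined (capa1[i:j] with
-- 0 ≤ i ≤ j is exactly (drop i).take (j - i))
def bOuter (l1 l2 : List Char) (i : Nat) : List Char :=
  if _hi : i < l1.length then
    if bInner l1 l2 i < l1.length then
      ((l1.drop i).take (bInner l1 l2 i - i)) ++ '1' :: bOuter l1 l2 (bInner l1 l2 i + 1)
    else
      (l1.drop i).take (bInner l1 l2 i - i)
  else []
termination_by l1.length - i
decreasing_by have := bInner_ge l1 l2 i; omega

-- literal port of B: run-based scan from index 0, join folded into the recursion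
def and_mode_alt (capa1 : String) (capa2 : String) : String :=
  String.ofList (bOuter capa1.toList capa2.toList 0)

-- ===== PRECONDITION & SPEC =====
def Spec_and_mode (capa1 : String) (capa2 : String) (out : String) : Prop := out = and_mode_alt capa1 capa2
instance (capa1 : String) (capa2 : String) (out : String) : Decidable (Spec_and_mode capa1 capa2 out) := by unfold Spec_and_mode; infer_instance

-- ===== CLAIM (what is proved, stated in full; the proofs are below) =====
def Claim_equal_and_mode : Prop := ∀ (capa1 : String) (capa2 : String), Dom_and_mode capa1 capa2 → Spec_and_mode capa1 capa2 (and_mode capa1 capa2)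

-- ===== LEMMAS AND PROOFS =====

-- canonical per-position form both ports are reduced to
def gSpec : List Char → List Char → List Char
  | [], _ => []
  | _ :: t1, [] => '1' :: gSpec t1 []
  | a :: t1, b :: t2 => (if a = b then a else '1') :: gSpec t1 t2

-- A's loop, expressed over List.range with drop/take slices, equals zip + fill
lemma loop_eq (l1 : List Char) : ∀ (l2 acc : List Char),
    (List.range l1.length).foldl
      (fun mode i =>
        if (List.drop i l1).take 1 = (List.drop i l2).take 1 then
          mode ++ (List.drop i l1).take 1
        else mode ++ ['1']) acc
    = acc ++ ((l1.zip l2).map (fun p => if p.1 = p.2 then p.1 else '1')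
        ++ List.replicate (l1.length - l2.length) '1') := by
  induction l1 with
  | nil => intro l2 acc; simp
  | cons x t ih =>
    intro l2 acc
    rw [show (x :: t).length = t.length + 1 from rfl,
        List.range_succ_eq_map, List.foldl_cons, List.foldl_map]
    have hstep :
        (fun (mode : List Char) (i : ℕ) =>
          if (List.drop (Nat.succ i) (x :: t)).take 1 = (List.drop (Nat.succ i) l2).take 1 then
            mode ++ (List.drop (Nat.succ i) (x :: t)).take 1
          else mode ++ ['1'])
        = (fun (mode : List Char) (i : ℕ) =>
          if (List.drop i t).take 1 = (List.drop i l2.tail).take 1 then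
            mode ++ (List.drop i t).take 1
          else mode ++ ['1']) := by
      funext mode i
      cases l2 with
      | nil => simp
      | cons y t2 => simp
    rw [hstep, ih l2.tail]
    cases l2 with
    | nil => simp [List.replicate_succ]
    | cons y t2 => by_cases hxy : x = y <;> simp [hxy, List.append_assoc]

-- the zip + fill form is gSpec
lemma g_eq_zip : ∀ (l1 l2 : List Char),
    gSpec l1 l2
      = (l1.zip l2).map (fun p => if p.1 = p.2 then p.1 else '1')
        ++ List.replicate (l1.length - l2.length) '1' := by
  intro l1
  induction l1 with
  | nil => intro l2; simp [gSpec]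
  | cons x t ih =>
    intro l2
    cases l2 with
    | nil => simp [gSpec, ih [], List.replicate_succ]
    | cons y t2 => simp [gSpec, ih t2]

-- peeling one matching position off the front of B's outer loop
lemma bOuter_cons (l1 l2 : List Char) (i : Nat) (hi : i < l1.length)
    (hc : i < l2.length ∧ l1.getD i ' ' = l2.getD i ' ') :
    bOuter l1 l2 i = l1.getD i ' ' :: bOuter l1 l2 (i + 1) := by
  have hin : bInner l1 l2 i = bInner l1 l2 (i + 1) := by
    rw [bInner, dif_pos ⟨hi, hc.1, hc.2⟩]
  have hge : i + 1 ≤ bInner l1 l2 (i + 1) := bInner_ge l1 l2 (i + 1)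
  have hdrop : l1.drop i = l1.getD i ' ' :: l1.drop (i + 1) := by
    rw [List.getD_eq_getElem l1 ' ' hi]
    exact List.drop_eq_getElem_cons hi
  by_cases hi1 : i + 1 < l1.length
  · conv_lhs => rw [bOuter]
    rw [dif_pos hi]
    conv_rhs => rw [bOuter]
    rw [dif_pos hi1]
    simp only [hin]
    set j := bInner l1 l2 (i + 1) with hj
    have htake : (l1.drop i).take (j - i)
        = l1.getD i ' ' :: (l1.drop (i + 1)).take (j - (i + 1)) := by
      rw [hdrop, show j - i = (j - (i + 1)) + 1 by omega, List.take_succ_cons]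
    by_cases hjn : j < l1.length <;> simp [hjn, htake]
  · -- i + 1 = l1.length: inner loop from i+1 stops immediately at j = i+1
    have hlen : i + 1 = l1.length := by omega
    have hj1 : bInner l1 l2 (i + 1) = i + 1 := by
      rw [bInner, dif_neg]; omega
    conv_lhs => rw [bOuter]
    rw [dif_pos hi]
    conv_rhs => rw [bOuter]
    rw [dif_neg (by omega : ¬ i + 1 < l1.length)]
    simp only [hin, hj1]
    rw [if_neg (by omega : ¬ i + 1 < l1.length)]
    rw [show i + 1 - i = 1 by omega, hdrop]
    simp

-- B's outer loop from index i computes gSpec of the two suffixes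
lemma bOuter_eq (l1 l2 : List Char) : ∀ (k i : Nat), l1.length - i ≤ k →
    bOuter l1 l2 i = gSpec (l1.drop i) (l2.drop i) := by
  intro k
  induction k with
  | zero =>
    intro i hk
    have hge : l1.length ≤ i := by omega
    rw [bOuter, dif_neg (by omega)]
    rw [List.drop_eq_nil_of_le hge]
    rfl
  | succ k ih =>
    intro i hk
    by_cases hi : i < l1.length
    · have hdrop1 : l1.drop i = l1.getD i ' ' :: l1.drop (i + 1) := by
        rw [List.getD_eq_getElem l1 ' ' hi]
        exact List.drop_eq_getElem_cons hi
      by_cases hc : i < l2.length ∧ l1.getD i ' ' = l2.getD i ' '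
      · -- matching position: peel it on both sides
        rw [bOuter_cons l1 l2 i hi hc, ih (i + 1) (by omega)]
        have hdrop2 : l2.drop i = l2.getD i ' ' :: l2.drop (i + 1) := by
          rw [List.getD_eq_getElem l2 ' ' hc.1]
          exact List.drop_eq_getElem_cons hc.1
        rw [hdrop1, hdrop2, ← hc.2]
        simp [gSpec]
      · -- mismatch (or l2 exhausted): inner loop stops at i, one '1' is emitted
        have hj : bInner l1 l2 i = i := by
          rw [bInner, dif_neg]; tauto
        rw [bOuter, dif_pos hi]
        simp only [hj, if_pos hi, Nat.sub_self, List.take_zero, List.nil_append]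
        rw [ih (i + 1) (by omega), hdrop1]
        by_cases h2 : i < l2.length
        · have hne : l1.getD i ' ' ≠ l2.getD i ' ' := by tauto
          have hdrop2 : l2.drop i = l2.getD i ' ' :: l2.drop (i + 1) := by
            rw [List.getD_eq_getElem l2 ' ' h2]
            exact List.drop_eq_getElem_cons h2
          rw [hdrop2]
          simp only [gSpec]
          rw [if_neg hne]
        · have h2' : l2.length ≤ i := by omega
          rw [List.drop_eq_nil_of_le h2', List.drop_eq_nil_of_le (as := l2) (by omega : l2.length ≤ i + 1)]
          rfl
    · rw [bOuter, dif_neg hi, List.drop_eq_nil_of_le (by omega)]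
      rfl

-- ===== VERDICT (by name: the statement is the Claim_ definition above) =====
theorem and_mode_spec : Claim_equal_and_mode := by
  intro capa1 capa2 _
  unfold Spec_and_mode and_mode and_mode_alt
  rw [PySem.Str.len_eq, PySem.List.pyRange_zero_nat, List.foldl_map]
  congr 1
  have hsl : ∀ (xs : List Char) (k : ℕ),
      PySem.List.slice xs (some (k : Int)) (some ((k : Int) + 1)) = (List.drop k xs).take 1 := by
    intro xs k
    have := PySem.List.slice_natCast xs k (k + 1)
    push_cast at this
    simpa using this
  simp only [hsl]
  rw [loop_eq capa1.toList capa2.toList []]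
  rw [bOuter_eq capa1.toList capa2.toList capa1.toList.length 0 (by omega)]
  simp [g_eq_zip]
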